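-- pv_equiv track=rewrite | github.com/Melclic/metaxime | rpSBML.py | _compareXref
-- ===== SOURCE A (Python) =====
-- import copy
--
-- def _compareXref(current, toadd):
--     """Compare two dictionaries of lists that describe the cross-reference and return the difference
--
--     :param current: The source cross-reference dictionary
--     :param toadd: The target cross-reference dictionary
--
--     :type current: dict
--     :type toadd: dict
--
--     :return: Difference between the two cross-reference dictionaries
--     :rtype: dict
--     """
--     toadd = copy.deepcopy(toadd)
--     for database_id in current:
--         try:
--             list_diff = [i for i in toadd[database_id] if i not in current[database_id]]
--             if not list_diff:
--                 toadd.pop(database_id)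
--             else:
--                 toadd[database_id] = list_diff
--         except KeyError:
--             pass
--     if toadd==None:
--         return []
--     return toadd
-- ===== SOURCE B (Python) =====
-- import copy
--
-- def _compareXref(current, toadd):
--     """Per-key difference of two cross-reference dicts, built fresh from toadd."""
--     result = {}
--     for key, vals in toadd.items():
--         if key in current:
--             diff = [i for i in vals if i not in current[key]]
--             if diff:
--                 result[key] = diff
--         else:
--             result[key] = copy.deepcopy(vals)
--     return result
-- ===== Notes on version B (the rewrite author's own statement) =====
-- stated objective: simpler
-- what changed: Instead of deep-copying toadd and mutating it (pop/replace) while looping over current's keys with a try/except, B builds the result dict in one pass over toadd's items, emitting the per-key difference (or the untouched value for keys absent from current); the dead 'toadd==None' branch is dropped.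
import Mathlib
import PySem

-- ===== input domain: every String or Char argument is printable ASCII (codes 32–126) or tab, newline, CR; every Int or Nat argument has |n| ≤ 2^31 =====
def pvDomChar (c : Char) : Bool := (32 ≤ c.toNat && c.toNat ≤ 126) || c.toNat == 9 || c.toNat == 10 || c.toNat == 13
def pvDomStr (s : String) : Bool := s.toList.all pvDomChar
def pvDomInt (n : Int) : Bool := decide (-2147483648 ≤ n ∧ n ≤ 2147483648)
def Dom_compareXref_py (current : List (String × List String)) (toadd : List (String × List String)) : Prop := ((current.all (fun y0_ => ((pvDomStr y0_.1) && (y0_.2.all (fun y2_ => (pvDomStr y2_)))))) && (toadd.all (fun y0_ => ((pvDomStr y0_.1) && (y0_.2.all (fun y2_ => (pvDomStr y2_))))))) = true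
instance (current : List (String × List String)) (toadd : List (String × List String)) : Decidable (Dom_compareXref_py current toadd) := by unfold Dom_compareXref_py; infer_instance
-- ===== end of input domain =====

-- B builds the result dict in one pass over toadd instead of deep-copying toadd and mutating it
-- while looping over current's keys; return-value equality only (A returns deep copies, value-equal).

-- ===== PORT A =====
-- one iteration of A's 'for database_id in current' loop, mutating the deep copy of toadd (acc):
-- try: list_diff = [i for i in toadd[k] if i not in current[k]]; if empty pop k else assign; except KeyError: pass
def pvStepA (current : List (String × List String)) (acc : List (String × List String)) (kv : String × List String) : List (String × List String) :=
  match List.lookup kv.1 acc with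
  | none => acc                                   -- toadd[database_id] raises KeyError → pass
  | some v =>
    match List.lookup kv.1 current with
    | none => acc                                 -- unreachable: database_id is a key of current
    | some cur =>
      let diff := v.filter (fun i => !cur.contains i)
      if diff.isEmpty then acc.eraseP (fun p => p.1 == kv.1)          -- toadd.pop(database_id)
      else acc.map (fun p => if p.1 == kv.1 then (p.1, diff) else p)  -- toadd[database_id] = list_diff

-- deepcopy is value-identity here; the 'if toadd==None: return []' branch is dead (a dict is never None)
def compareXref_py (current : List (String × List String)) (toadd : List (String × List String)) : List (String × List String) :=
  current.foldl (pvStepA current) toadd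

-- ===== PORT B =====
def compareXref_py_alt (current : List (String × List String)) (toadd : List (String × List String)) : List (String × List String) :=
  toadd.foldl (fun res kv =>
    match List.lookup kv.1 current with
    | some cur =>
      let diff := kv.2.filter (fun i => !cur.contains i)
      if diff.isEmpty then res else res ++ [(kv.1, diff)]
    | none => res ++ [(kv.1, kv.2)]) []

-- ===== PRECONDITION & SPEC =====
-- Pre_ is the dict representation invariant: an association list standing for a Python dict has
-- distinct keys (every dict the Python function can receive satisfies it; nothing else is excluded).
def Pre_compareXref_py (current : List (String × List String)) (toadd : List (String × List String)) : Prop :=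
  (current.map Prod.fst).Nodup ∧ (toadd.map Prod.fst).Nodup
instance (current : List (String × List String)) (toadd : List (String × List String)) : Decidable (Pre_compareXref_py current toadd) := by unfold Pre_compareXref_py; infer_instance

def pvWitness_compareXref_py : (List (String × List String)) × (List (String × List String)) :=
  ([("a", ["x"])], [("a", ["x", "y"]), ("b", ["z"])])

def Spec_compareXref_py (current : List (String × List String)) (toadd : List (String × List String)) (out : List (String × List String)) : Prop := out = compareXref_py_alt current toadd
instance (current : List (String × List String)) (toadd : List (String × List String)) (out : List (String × List String)) : Decidable (Spec_compareXref_py current toadd out) := by unfold Spec_compareXref_py; infer_instance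

-- ===== CLAIM (what is proved, stated in full; the proofs are below) =====
def Claim_equal_compareXref_py : Prop := ∀ (current : List (String × List String)) (toadd : List (String × List String)), Dom_compareXref_py current toadd → Pre_compareXref_py current toadd → Spec_compareXref_py current toadd (compareXref_py current toadd)

-- ===== LEMMAS AND PROOFS =====

-- how one toadd entry ends up in the result: dropped, replaced by the diff, or kept
def pvH (current : List (String × List String)) (kv : String × List String) : Option (String × List String) :=
  match List.lookup kv.1 current with
  | none => some kv
  | some cur =>
    let diff := kv.2.filter (fun i => !cur.contains i)
    if diff.isEmpty then none else some (kv.1, diff)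

def pvF (current : List (String × List String)) (ks : List String) (kv : String × List String) : Option (String × List String) :=
  if kv.1 ∈ ks then pvH current kv else some kv

theorem pv_lookup_cons (k : String) (p : String × List String) (l : List (String × List String)) :
    List.lookup k (p :: l) = if k = p.1 then some p.2 else List.lookup k l := by
  obtain ⟨a, b⟩ := p
  simp only [List.lookup]
  by_cases h : k = a
  · simp [h]
  · rw [show (k == a) = false by simp [h], if_neg h]

theorem pv_lookup_eq_none_iff (k : String) : ∀ l : List (String × List String),
    List.lookup k l = none ↔ k ∉ l.map Prod.fst := by
  intro l
  induction l with
  | nil => simp [List.lookup]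
  | cons p l ih =>
    rw [pv_lookup_cons]
    by_cases h : k = p.1 <;> simp [h, ih]

theorem pv_lookup_isSome_iff (k : String) (l : List (String × List String)) :
    (List.lookup k l).isSome ↔ k ∈ l.map Prod.fst := by
  rw [← Decidable.not_not (p := k ∈ l.map Prod.fst), ← pv_lookup_eq_none_iff]
  cases List.lookup k l <;> simp

theorem pv_stepA_cons_ne (current : List (String × List String)) (p c : String × List String)
    (acc : List (String × List String)) (hne : c.1 ≠ p.1) :
    pvStepA current (p :: acc) c = p :: pvStepA current acc c := by
  have hpb : (p.1 == c.1) = false := by simp [Ne.symm hne]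
  unfold pvStepA
  rw [pv_lookup_cons, if_neg hne]
  cases h : List.lookup c.1 acc with
  | none => simp
  | some v =>
    cases List.lookup c.1 current with
    | none => simp
    | some cur =>
      simp only
      split_ifs with hd
      · rw [List.eraseP_cons, hpb]; rfl
      · rw [List.map_cons]
        congr 1
        rw [hpb]
        simp

-- the keys of the mutated dict form a sublist of the old keys
theorem pv_keys_stepA_sublist (current : List (String × List String)) (acc : List (String × List String))
    (c : String × List String) :
    ((pvStepA current acc c).map Prod.fst).Sublist (acc.map Prod.fst) := by
  unfold pvStepA
  cases List.lookup c.1 acc with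
  | none => exact List.Sublist.refl _
  | some v =>
    cases List.lookup c.1 current with
    | none => exact List.Sublist.refl _
    | some cur =>
      simp only
      split_ifs with hd
      · exact List.Sublist.map _ (List.eraseP_sublist)
      · have heq : (acc.map (fun p => if p.1 == c.1 then (p.1, (v.filter (fun i => !cur.contains i))) else p)).map Prod.fst = acc.map Prod.fst := by
          rw [List.map_map]
          apply List.map_congr_left
          intro p _
          by_cases h : p.1 = c.1 <;> simp [h]
        rw [heq]

-- one A-step equals pushing the key c.1 from the pending set into the per-entry description
theorem pv_stepA_filterMap (current : List (String × List String)) (c : String × List String)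
    (ks : List String) (acc : List (String × List String))
    (hacc : (acc.map Prod.fst).Nodup) (hc : c.1 ∉ ks)
    (hsome : (List.lookup c.1 current).isSome) :
    (pvStepA current acc c).filterMap (pvF current ks) = acc.filterMap (pvF current (c.1 :: ks)) := by
  induction acc with
  | nil => simp [pvStepA, List.lookup]
  | cons p acc ih =>
    rw [List.map_cons, List.nodup_cons] at hacc
    have hacc' : (acc.map Prod.fst).Nodup := hacc.2
    have hp_not : p.1 ∉ acc.map Prod.fst := hacc.1
    by_cases hpc : p.1 = c.1
    · -- p is the (unique) entry with key c.1
      obtain ⟨cur, hcur⟩ := Option.isSome_iff_exists.1 hsome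
      have hstep : pvStepA current (p :: acc) c =
          (if (p.2.filter (fun i => !cur.contains i)).isEmpty then acc
           else (p.1, p.2.filter (fun i => !cur.contains i)) :: acc) := by
        unfold pvStepA
        rw [pv_lookup_cons, if_pos hpc.symm, hcur]
        simp only
        split_ifs with hd
        · rw [List.eraseP_cons, show (p.1 == c.1) = true by simp [hpc]]; rfl
        · rw [List.map_cons, show (if (p.1 == c.1) = true then (p.1, p.2.filter (fun i => !cur.contains i)) else p) = (p.1, p.2.filter (fun i => !cur.contains i)) by simp [hpc]]
          congr 1
          have : acc.map (fun q => if (q.1 == c.1) = true then (q.1, p.2.filter (fun i => !cur.contains i)) else q) = acc.map id := by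
            apply List.map_congr_left
            intro q hq
            have : q.1 ≠ c.1 := fun h => hp_not (hpc ▸ h ▸ List.mem_map_of_mem hq)
            simp [this]
          rw [this, List.map_id]
      have htail : acc.filterMap (pvF current ks) = acc.filterMap (pvF current (c.1 :: ks)) := by
        apply List.filterMap_congr
        intro q hq
        have hqne : q.1 ≠ c.1 := fun h => hp_not (hpc ▸ h ▸ List.mem_map_of_mem hq)
        simp [pvF, hqne]
      have hhead : pvF current (c.1 :: ks) p =
          (if (p.2.filter (fun i => !cur.contains i)).isEmpty then none
           else some (p.1, p.2.filter (fun i => !cur.contains i))) := by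
        simp only [pvF, pvH, hpc, hcur]
        rw [if_pos (List.mem_cons_self)]
      rw [hstep]
      split_ifs with hd
      · rw [htail, List.filterMap_cons, hhead, if_pos hd]
      · rw [List.filterMap_cons, List.filterMap_cons, hhead, if_neg hd]
        have hsnd : pvF current ks (p.1, p.2.filter (fun i => !cur.contains i)) = some (p.1, p.2.filter (fun i => !cur.contains i)) := by
          simp [pvF, hpc, hc]
        rw [hsnd, htail]
    · -- p's key differs from c.1: the step passes over p
      rw [pv_stepA_cons_ne current p c acc (fun h => hpc h.symm)]
      rw [List.filterMap_cons, List.filterMap_cons, ih hacc']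
      congr 1
      simp [pvF, hpc]

-- the whole of A's loop, by induction on the processed keys
theorem pv_foldA (current : List (String × List String)) : ∀ (ks acc : List (String × List String)),
    (ks.map Prod.fst).Nodup → (acc.map Prod.fst).Nodup →
    (∀ kv ∈ ks, (List.lookup kv.1 current).isSome) →
    ks.foldl (pvStepA current) acc = acc.filterMap (pvF current (ks.map Prod.fst)) := by
  intro ks
  induction ks with
  | nil => intro acc _ _ _; simp [pvF]
  | cons c cs ih =>
    intro acc hks hacc hsome
    rw [List.map_cons, List.nodup_cons] at hks
    have hstep_nodup : ((pvStepA current acc c).map Prod.fst).Nodup :=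
      hacc.sublist (pv_keys_stepA_sublist current acc c)
    rw [List.foldl_cons,
        ih (pvStepA current acc c) hks.2 hstep_nodup (fun kv h => hsome kv (List.mem_cons_of_mem _ h)),
        pv_stepA_filterMap current c (cs.map Prod.fst) acc hacc hks.1 (hsome c List.mem_cons_self)]
    rfl

-- B's loop is the same filterMap
theorem pv_foldB (current : List (String × List String)) (toadd : List (String × List String)) :
    ∀ res, toadd.foldl (fun res kv =>
      match List.lookup kv.1 current with
      | some cur =>
        let diff := kv.2.filter (fun i => !cur.contains i)
        if diff.isEmpty then res else res ++ [(kv.1, diff)]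
      | none => res ++ [(kv.1, kv.2)]) res = res ++ toadd.filterMap (pvH current) := by
  induction toadd with
  | nil => intro res; simp
  | cons kv tl ih =>
    intro res
    rw [List.foldl_cons, List.filterMap_cons]
    cases h : List.lookup kv.1 current with
    | none =>
      have hkv : pvH current kv = some kv := by simp [pvH, h]
      rw [ih, hkv]
      simp
    | some cur =>
      dsimp only
      by_cases hd : (kv.2.filter (fun i => !cur.contains i)).isEmpty
      · have hkv : pvH current kv = none := by
          unfold pvH
          rw [h]
          exact if_pos hd
        rw [if_pos hd, ih, hkv]
      · have hkv : pvH current kv = some (kv.1, kv.2.filter (fun i => !cur.contains i)) := by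
          unfold pvH
          rw [h]
          exact if_neg hd
        rw [if_neg hd, ih, hkv]
        simp

-- ===== VERDICT (by name: the statement is the Claim_ definition above) =====
theorem compareXref_py_spec : Claim_equal_compareXref_py := by
  intro current toadd _ hpre
  unfold Spec_compareXref_py compareXref_py compareXref_py_alt
  rw [pv_foldA current current toadd hpre.1 hpre.2
        (fun kv h => (pv_lookup_isSome_iff kv.1 current).2 (List.mem_map_of_mem h)),
      pv_foldB, List.nil_append]
  apply List.filterMap_congr
  intro kv _
  by_cases h : kv.1 ∈ current.map Prod.fst
  · simp [pvF, h]
  · have hnone : List.lookup kv.1 current = none := (pv_lookup_eq_none_iff kv.1 current).2 h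
    simp [pvF, h, pvH, hnone]
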